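-- pv_equiv track=rewrite | github.com/laurelhiatt/inSTRbility | inSTRbility/operation_utils.py | remove_softclips
-- ===== SOURCE A (Python) =====
-- def remove_softclips(cigar):
--     """
--     Removes the softclips from the CIGAR string
--
--     Args:
--         cigar(str): CIGAR string
--
--     Returns:
--         CIGAR string without softclips
--     """
--
--     new_cigar = ''
--     length = ''
--     for c in cigar:
--         if c.isdigit(): length += c
--         else:
--             if c != 'S': new_cigar += f'{length}{c}'
--             length = ''
--     return new_cigar
-- ===== SOURCE B (Python) =====
-- def remove_softclips(cigar):
--     # Two-phase: tokenize into (length, op) pairs, then join all non-'S' tokens.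
--     pairs = []
--     i, n = 0, len(cigar)
--     while i < n:
--         j = i
--         while j < n and cigar[j].isdigit():
--             j += 1
--         if j == n:
--             break
--         pairs.append((cigar[i:j], cigar[j]))
--         i = j + 1
--     return ''.join(l + op for l, op in pairs if op != 'S')
-- ===== Notes on version B (the rewrite author's own statement) =====
-- stated objective: idiomatic
-- what changed: B first tokenizes the CIGAR into (length, op) pairs with an index-based scanner and then joins all non-softclip tokens, instead of A's single pass mutating two string accumulators.
import Mathlib
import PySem

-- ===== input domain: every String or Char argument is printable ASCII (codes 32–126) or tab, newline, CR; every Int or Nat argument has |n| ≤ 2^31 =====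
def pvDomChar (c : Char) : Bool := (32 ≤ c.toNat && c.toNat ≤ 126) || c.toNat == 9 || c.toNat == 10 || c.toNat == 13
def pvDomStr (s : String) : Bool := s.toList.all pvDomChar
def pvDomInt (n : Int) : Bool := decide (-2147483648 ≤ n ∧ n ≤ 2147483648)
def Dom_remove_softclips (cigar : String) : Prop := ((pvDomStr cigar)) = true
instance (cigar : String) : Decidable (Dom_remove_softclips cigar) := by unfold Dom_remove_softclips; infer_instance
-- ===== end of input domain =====

-- B tokenizes the CIGAR and joins the non-'S' tokens; same O(n) cost, just a cleaner decomposition than A's single-pass accumulators.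

-- ===== PORT A =====
-- A's for-loop over the characters with the two string accumulators (new_cigar, length),
-- carried as List Char (String.push/append on the list side; c.isdigit() = PySem.Chars.isdigit, exact on ASCII).
def removeSoftclipsLoopA (acc : List Char) (len : List Char) : List Char → List Char
  | [] => acc
  | c :: cs =>
    if PySem.Chars.isdigit c then removeSoftclipsLoopA acc (len ++ [c]) cs
    else
      if c ≠ 'S' then removeSoftclipsLoopA (acc ++ len ++ [c]) [] cs
      else removeSoftclipsLoopA acc [] cs

def remove_softclips (cigar : String) : String :=
  String.ofList (removeSoftclipsLoopA [] [] cigar.toList)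

-- ===== PORT B =====
-- B's outer while-loop: cut the next (digit-run, op) pair off the front (the inner while = takeWhile/dropWhile),
-- stop when only digits remain.
def removeSoftclipsTokB : List Char → List (List Char × Char)
  | cs =>
    match h : cs.dropWhile PySem.Chars.isdigit with
    | [] => []
    | op :: rs => (cs.takeWhile PySem.Chars.isdigit, op) :: removeSoftclipsTokB rs
termination_by cs => cs.length
decreasing_by
  have := List.length_dropWhile_le (p := PySem.Chars.isdigit) (l := cs)
  simp [h] at this
  omega

def remove_softclips_alt (cigar : String) : String :=
  String.ofList
    (((removeSoftclipsTokB cigar.toList).filter (fun p => p.2 ≠ 'S')).flatMap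
      (fun p => p.1 ++ [p.2]))

-- ===== PRECONDITION & SPEC =====
def Spec_remove_softclips (cigar : String) (out : String) : Prop := out = remove_softclips_alt cigar
instance (cigar : String) (out : String) : Decidable (Spec_remove_softclips cigar out) := by unfold Spec_remove_softclips; infer_instance

-- ===== CLAIM (what is proved, stated in full; the proofs are below) =====
def Claim_equal_remove_softclips : Prop := ∀ (cigar : String), Dom_remove_softclips cigar → Spec_remove_softclips cigar (remove_softclips cigar)

-- ===== LEMMAS AND PROOFS =====

def renderB (cs : List Char) : List Char :=
  ((removeSoftclipsTokB cs).filter (fun p => p.2 ≠ 'S')).flatMap (fun p => p.1 ++ [p.2])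

lemma renderB_unfold (cs : List Char) :
    renderB cs =
      match cs.dropWhile PySem.Chars.isdigit with
      | [] => []
      | op :: rs =>
        (if op ≠ 'S' then cs.takeWhile PySem.Chars.isdigit ++ [op] else []) ++ renderB rs := by
  unfold renderB
  rw [removeSoftclipsTokB]
  rcases h : cs.dropWhile PySem.Chars.isdigit with _ | ⟨op, rs⟩
  · simp
  · by_cases hop : op = 'S' <;> simp [hop, List.filter_cons, List.flatMap_cons]

lemma loopA_eq (cs : List Char) : ∀ acc len,
    removeSoftclipsLoopA acc len cs =
      acc ++ (match cs.dropWhile PySem.Chars.isdigit with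
        | [] => []
        | op :: rs =>
          (if op ≠ 'S' then len ++ cs.takeWhile PySem.Chars.isdigit ++ [op] else []) ++ renderB rs) := by
  induction cs with
  | nil => intro acc len; simp [removeSoftclipsLoopA]
  | cons c cs ih =>
    intro acc len
    by_cases hd : PySem.Chars.isdigit c
    · rw [removeSoftclipsLoopA, if_pos hd, ih]
      rcases h : cs.dropWhile PySem.Chars.isdigit with _ | ⟨op, rs⟩ <;>
        simp [List.dropWhile_cons, hd, h]
    · have hd' : PySem.Chars.isdigit c = false := by simpa using hd
      have htl : (c :: cs).dropWhile PySem.Chars.isdigit = c :: cs := by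
        simp [List.dropWhile_cons, hd']
      have hrB : renderB cs =
          (match cs.dropWhile PySem.Chars.isdigit with
            | [] => []
            | op :: rs =>
              (if op ≠ 'S' then ([] : List Char) ++ cs.takeWhile PySem.Chars.isdigit ++ [op] else []) ++ renderB rs) := by
        rw [renderB_unfold]; rcases cs.dropWhile PySem.Chars.isdigit with _ | ⟨op, rs⟩ <;> simp
      rw [removeSoftclipsLoopA, if_neg hd]
      by_cases hc : c = 'S'
      · rw [if_neg (by simp [hc]), ih, ← hrB, htl]
        simp [hc]
      · rw [if_pos (by simp [hc]), ih, ← hrB, htl]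
        simp [hc, List.takeWhile_cons, hd']

theorem removesoftclips_eq (cigar : String) :
    remove_softclips cigar = remove_softclips_alt cigar := by
  unfold remove_softclips remove_softclips_alt
  rw [loopA_eq]
  rw [show (((removeSoftclipsTokB cigar.toList).filter (fun p => p.2 ≠ 'S')).flatMap
      (fun p => p.1 ++ [p.2])) = renderB cigar.toList from rfl]
  rw [renderB_unfold]
  rcases cigar.toList.dropWhile PySem.Chars.isdigit with _ | ⟨op, rs⟩
  · rfl
  · by_cases hop : op = 'S' <;> simp [hop]

-- ===== VERDICT (by name: the statement is the Claim_ definition above) =====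
theorem remove_softclips_spec : Claim_equal_remove_softclips := by
  intro cigar _
  unfold Spec_remove_softclips
  exact removesoftclips_eq cigar
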